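-- pv_equiv track=rewrite | github.com/Just-NB/Algorithm | Baekjoon/2022/Jan/15/1208.py | get_comb_sum
-- ===== SOURCE A (Python) =====
-- from itertools import combinations
--
-- def get_comb_sum(lst: list) -> dict:
--     l = len(lst)
--     result = dict()
--     for i in range(l + 1):
--         comb = combinations(lst, i)
--         for c in comb:
--             ret = sum(c)
--             if ret in result.keys():
--                 result[ret] += 1
--             else:
--                 result[ret] = 1
--
--     return result
-- ===== SOURCE B (Python) =====
-- def get_comb_sum(lst: list) -> dict:
--     # Bottom-up DP over the list (right to left): rows[i] holds the sums of all
--     # size-i combinations of the suffix processed so far, in itertools' order;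
--     # each element extends existing sums by one addition, so no subset tuple is
--     # ever materialised or re-summed.
--     rows = [[0]]
--     for x in reversed(lst):
--         rows = [[0]] + [[x + s for s in row] + nxt
--                         for row, nxt in zip(rows, rows[1:] + [[]])]
--     result = dict()
--     for row in rows:
--         for s in row:
--             result[s] = result.get(s, 0) + 1
--     return result
-- ===== Notes on version B (the rewrite author's own statement) =====
-- stated objective: alternative
-- what changed: replaces itertools.combinations + per-subset re-summation with an iterative right-to-left DP that folds each element into a table rows[size] of partial sums (one addition per new sum, no subset tuples), then counts the flattened table with dict.get instead of a keys() membership test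
import Mathlib
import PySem

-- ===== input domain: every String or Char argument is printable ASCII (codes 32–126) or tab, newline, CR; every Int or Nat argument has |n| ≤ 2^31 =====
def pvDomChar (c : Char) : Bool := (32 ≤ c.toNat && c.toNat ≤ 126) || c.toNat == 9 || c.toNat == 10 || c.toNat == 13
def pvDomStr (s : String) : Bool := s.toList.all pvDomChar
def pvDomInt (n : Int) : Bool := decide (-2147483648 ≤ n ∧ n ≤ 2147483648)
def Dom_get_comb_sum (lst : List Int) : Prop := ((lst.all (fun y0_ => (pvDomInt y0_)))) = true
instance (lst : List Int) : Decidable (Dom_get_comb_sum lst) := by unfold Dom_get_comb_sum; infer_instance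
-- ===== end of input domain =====

-- B replaces per-subset enumeration and re-summation (A) by an iterative DP
-- folding each element into a size-indexed table of partial sums (alternative
-- algorithm; same return value, dict in the same insertion order).

-- ===== PORT A =====
-- itertools.combinations(lst, i) in its lexicographic-by-index order
def pvCombos : List Int → Nat → List (List Int)
  | _, 0 => [[]]
  | [], _ + 1 => []
  | x :: xs, i + 1 => (pvCombos xs i).map (fun c => x :: c) ++ pvCombos xs (i + 1)

def get_comb_sum (lst : List Int) : List (Int × Int) :=
  let l := lst.length
  ((List.range (l + 1)).foldl (fun result i =>
      (pvCombos lst i).foldl (fun result c =>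
        let ret := c.sum
        if result.contains ret then
          -- result[ret] += 1 : the guard guarantees the key is present,
          -- so 'getD ret 0' reads exactly the stored value (Python's result[ret])
          result.insert ret (result.getD ret 0 + 1)
        else
          result.insert ret 1) result)
    PySem.Dict.empty).items

-- ===== PORT B =====
-- one step of Source B's loop body:
-- rows = [[0]] + [[x + s for s in row] + nxt for row, nxt in zip(rows, rows[1:] + [[]])]
def pvStepRows (x : Int) (rows : List (List Int)) : List (List Int) :=
  ([0] : List Int) ::
    ((rows.zip (rows.drop 1 ++ [[]])).map
      (fun p => p.1.map (fun s => x + s) ++ p.2))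

def get_comb_sum_alt (lst : List Int) : List (Int × Int) :=
  -- 'for x in reversed(lst)' threading the accumulator = foldr over lst
  let rows := lst.foldr pvStepRows [[0]]
  ((rows.foldl (fun result row =>
      row.foldl (fun result s => result.insert s (result.getD s 0 + 1)) result))
    PySem.Dict.empty).items

-- ===== PRECONDITION & SPEC =====
def Spec_get_comb_sum (lst : List Int) (out : List (Int × Int)) : Prop := out = get_comb_sum_alt lst
instance (lst : List Int) (out : List (Int × Int)) : Decidable (Spec_get_comb_sum lst out) := by unfold Spec_get_comb_sum; infer_instance

-- ===== CLAIM (what is proved, stated in full; the proofs are below) =====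
def Claim_equal_get_comb_sum : Prop := ∀ (lst : List Int), Dom_get_comb_sum lst → Spec_get_comb_sum lst (get_comb_sum lst)

-- ===== LEMMAS AND PROOFS =====

-- row i of A's enumeration: the sums of the size-i combinations, in order
def pvRowOf (lst : List Int) (i : Nat) : List Int := (pvCombos lst i).map List.sum

theorem pvCombos_nil_of_lt (xs : List Int) : ∀ (i : Nat), xs.length < i → pvCombos xs i = [] := by
  induction xs with
  | nil => intro i h; cases i with
    | zero => omega
    | succ j => rfl
  | cons x xs ih =>
      intro i h
      cases i with
      | zero => simp at h
      | succ j =>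
          simp only [pvCombos]
          rw [ih j (by simpa using h), ih (j + 1) (by simp at h; omega)]
          simp

-- B's DP table is exactly A's rows of combination sums
theorem pvRows_eq (lst : List Int) :
    lst.foldr pvStepRows [[0]] = (List.range (lst.length + 1)).map (pvRowOf lst) := by
  induction lst with
  | nil => rfl
  | cons x xs ih =>
      have hlen : pvRowOf xs (xs.length + 1) = [] := by
        simp [pvRowOf, pvCombos_nil_of_lt xs (xs.length + 1) (by omega)]
      calc (x :: xs).foldr pvStepRows [[0]]
          = pvStepRows x ((List.range (xs.length + 1)).map (pvRowOf xs)) := by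
            simp [List.foldr_cons, ih]
        _ = (List.range ((x :: xs).length + 1)).map (pvRowOf (x :: xs)) := by
            unfold pvStepRows
            have hdrop :
                ((List.range (xs.length + 1)).map (pvRowOf xs)).drop 1 ++ [[]] =
                (List.range (xs.length + 1)).map (fun i => pvRowOf xs (i + 1)) := by
              rw [← hlen]
              apply List.ext_getElem
              · simp
              · intro i h1 h2
                simp only [List.length_append, List.length_drop, List.length_map,
                  List.length_range, List.length_cons, List.length_nil] at h1 h2
                by_cases hi : i < xs.length
                · rw [List.getElem_append_left (by simpa using hi)]
                  simp
                · have hieq : i = xs.length := by omega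
                  subst hieq
                  rw [List.getElem_append_right (by simp)]
                  simp
            rw [hdrop, List.zip_map', List.map_map]
            have hcons : List.range ((x :: xs).length + 1) =
                0 :: (List.range (xs.length + 1)).map (· + 1) := by
              simp [List.range_succ_eq_map]
            rw [hcons]
            simp only [List.map_cons, List.map_map]
            refine List.cons_eq_cons.mpr ⟨by simp [pvRowOf, pvCombos], ?_⟩
            apply List.map_congr_left
            intro i _
            simp [Function.comp_def, pvRowOf, pvCombos, List.map_map]

-- A's guarded counting step is B's unguarded one
theorem pvStep_eq (result : PySem.Dict Int Int) (s : Int) :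
    (if result.contains s then result.insert s (result.getD s 0 + 1)
     else result.insert s 1) = result.insert s (result.getD s 0 + 1) := by
  by_cases h : result.contains s = true
  · simp [h]
  · rw [if_neg h, PySem.Dict.getD_of_not_contains (h := by simpa using h)]
    norm_num

-- ===== VERDICT (by name: the statement is the Claim_ definition above) =====
theorem get_comb_sum_spec : Claim_equal_get_comb_sum := by
  intro lst _
  unfold Spec_get_comb_sum get_comb_sum get_comb_sum_alt
  apply congrArg PySem.Dict.items
  beta_reduce
  rw [pvRows_eq, List.foldl_map]
  apply PySem.List.foldl_congr_mem
  intro result i _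
  unfold pvRowOf
  rw [List.foldl_map]
  apply PySem.List.foldl_congr_mem
  intro acc c _
  exact pvStep_eq acc c.sum
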